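-- pv_equiv track=rewrite | github.com/dotnet/performance | src/benchmarks/gc/src/analysis/mem_utils.py | _take_bars_and_arrow
-- ===== SOURCE A (Python) =====
-- from typing import cast, Dict, Iterable, List, Optional, Sequence, Tuple
--
-- def _take_bars_and_arrow(line: str) -> Optional[Tuple[int, str]]:
--     """
--     Given '| | ->abc', returns (2, "abc")
--     Given '| |', returns None
--     """
--     bars = 0
--     for i, ch in enumerate(line):
--         if ch == "|":
--             bars += 1
--         elif ch == "-":
--             assert line[i + 1] == ">"
--             return bars, line[i + 2 :]
--         else:
--             assert ch == " "
--     # Made it to end without seeing '-'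
--     return None
-- ===== SOURCE B (Python) =====
-- def _take_bars_and_arrow(line):
--     """
--     Given '| | ->abc', returns (2, "abc")
--     Given '| |', returns None
--     """
--     idx = line.find('-')
--     if idx == -1:
--         assert all(c in '| ' for c in line)
--         return None
--     prefix = line[:idx]
--     assert all(c in '| ' for c in prefix)
--     assert line[idx + 1] == '>'
--     return prefix.count('|'), line[idx + 2:]
-- ===== Notes on version B (the rewrite author's own statement) =====
-- stated objective: idiomatic
-- what changed: Replaces the index-tracking accumulating scan with string operations: find the first '-', validate the prefix with all(), and return (prefix.count('|'), remainder) via slicing.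
import Mathlib
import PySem

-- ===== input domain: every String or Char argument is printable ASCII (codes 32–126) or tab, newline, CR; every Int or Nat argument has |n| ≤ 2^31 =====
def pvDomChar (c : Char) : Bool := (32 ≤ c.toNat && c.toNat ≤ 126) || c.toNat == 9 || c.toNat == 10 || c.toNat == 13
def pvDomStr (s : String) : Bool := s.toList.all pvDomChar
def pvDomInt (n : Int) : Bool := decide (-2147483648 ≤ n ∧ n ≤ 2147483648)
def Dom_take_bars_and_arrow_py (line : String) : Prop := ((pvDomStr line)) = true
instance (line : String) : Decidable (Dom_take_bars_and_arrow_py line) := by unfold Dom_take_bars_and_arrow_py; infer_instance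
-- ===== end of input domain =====

-- B replaces A's single index-tracking accumulating loop with idiomatic string operations
-- (find the first '-', then count '|' in the prefix and slice off the rest): same cost, clearer.

-- ===== PORT A =====
-- the loop over enumerate(line): state = bars; the asserts raise only outside Pre_, so the
-- port continues (assert ch == ' ') / returns (assert line[i+1] == '>') where Python would raise.
-- line[i+2:] of the original string = rest.drop 1 where rest is the suffix after the '-'.
def pvBarsLoopA : List Char → Int → Option (Int × String)
  | [], _ => none
  | c :: rest, bars =>
    if c = '|' then pvBarsLoopA rest (bars + 1)
    else if c = '-' then some (bars, String.ofList (rest.drop 1))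
    else pvBarsLoopA rest bars

def take_bars_and_arrow_py (line : String) : Option (Int × String) :=
  pvBarsLoopA line.toList 0

-- ===== PORT B =====
-- idx = line.find('-'); prefix = line[:idx]; return prefix.count('|'), line[idx+2:]
-- (the asserts raise only outside Pre_, so the port just proceeds)
def take_bars_and_arrow_py_alt (line : String) : Option (Int × String) :=
  let idx := PySem.Str.find line "-"
  if idx = -1 then
    none
  else
    let pre := PySem.List.slice line.toList none (some idx)
    some ((PySem.Chars.count pre ['|'] : Int), String.ofList (PySem.List.slice line.toList (some (idx + 2)) none))

-- ===== PRECONDITION & SPEC =====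
-- Pre_ excludes exactly the inputs on which Python A raises (AssertionError on a character
-- other than '|', ' ' before the first '-', or '-' not followed by '>'; IndexError on a
-- trailing lone '-'): everything up to the first non-"| " character must be '|' or ' ',
-- and that character, if any, must be '-' immediately followed by '>'.
def Pre_take_bars_and_arrow_py (line : String) : Prop :=
  let r := line.toList.dropWhile (fun c => c == '|' || c == ' ')
  r = [] ∨ (r.head? = some '-' ∧ r.tail.head? = some '>')
instance (line : String) : Decidable (Pre_take_bars_and_arrow_py line) := by
  unfold Pre_take_bars_and_arrow_py; infer_instance

def pvWitness_take_bars_and_arrow_py : String := "| | ->abc"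

def Spec_take_bars_and_arrow_py (line : String) (out : Option (Int × String)) : Prop := out = take_bars_and_arrow_py_alt line
instance (line : String) (out : Option (Int × String)) : Decidable (Spec_take_bars_and_arrow_py line out) := by unfold Spec_take_bars_and_arrow_py; infer_instance

-- ===== CLAIM (what is proved, stated in full; the proofs are below) =====
def Claim_equal_take_bars_and_arrow_py : Prop := ∀ (line : String), Dom_take_bars_and_arrow_py line → Pre_take_bars_and_arrow_py line → Spec_take_bars_and_arrow_py line (take_bars_and_arrow_py line)

-- ===== LEMMAS AND PROOFS =====

lemma pv_find_go_nil (k : Nat) : PySem.Chars.find.go ['-'] [] k = -1 := by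
  unfold PySem.Chars.find.go
  simp

lemma pv_find_go_cons (c : Char) (cs : List Char) (k : Nat) :
    PySem.Chars.find.go ['-'] (c :: cs) k =
      if c = '-' then (k : Int) else PySem.Chars.find.go ['-'] cs (k + 1) := by
  conv_lhs => unfold PySem.Chars.find.go
  by_cases h : c = '-'
  · simp [List.cons_prefix_cons, List.isPrefixOf, h]
  · rw [if_neg h]
    have hpre : (['-'].isPrefixOf (c :: cs)) = false := by
      simp only [List.isPrefixOf, Bool.and_eq_true, beq_iff_eq, Bool.and_true]
      simp [beq_iff_eq]
      exact fun hh => h hh.symm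
    rw [if_neg (by simp [hpre])]

lemma pv_find_go_succ (cs : List Char) (k : Nat) :
    PySem.Chars.find.go ['-'] cs (k + 1) =
      if PySem.Chars.find.go ['-'] cs k = -1 then -1
      else PySem.Chars.find.go ['-'] cs k + 1 := by
  induction cs generalizing k with
  | nil => simp [pv_find_go_nil]
  | cons c cs ih =>
    rw [pv_find_go_cons, pv_find_go_cons]
    by_cases h : c = '-'
    · have hk : ((k : Int)) ≠ -1 := by omega
      simp only [h, ite_true, if_neg hk]
      push_cast; ring
    · simp only [h, if_neg, ite_false]
      exact ih (k + 1)

lemma pv_find_nil : PySem.Chars.find ([] : List Char) ['-'] = -1 := by decide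

lemma pv_find_cons (c : Char) (cs : List Char) :
    PySem.Chars.find (c :: cs) ['-'] =
      if c = '-' then 0
      else if PySem.Chars.find cs ['-'] = -1 then -1 else PySem.Chars.find cs ['-'] + 1 := by
  unfold PySem.Chars.find
  rw [pv_find_go_cons]
  by_cases h : c = '-'
  · simp [h]
  · simp only [h, ite_false]
    exact pv_find_go_succ cs 0

lemma pv_count_go (cs : List Char) (n k : Nat) (h : cs.length ≤ n) :
    PySem.Chars.count.go ['|'] n cs k = k + cs.count '|' := by
  induction n generalizing cs k with
  | zero =>
    have : cs = [] := List.length_eq_zero_iff.mp (Nat.le_zero.mp h)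
    subst this
    unfold PySem.Chars.count.go
    simp
  | succ n ih =>
    cases cs with
    | nil =>
      unfold PySem.Chars.count.go
      simp
    | cons c cs =>
      unfold PySem.Chars.count.go
      by_cases hc : c = '|'
      · simp only [List.isPrefixOf, hc, List.length_cons] at h ⊢
        simp only [beq_self_eq_true, Bool.true_and, List.isPrefixOf]
        rw [if_pos (by simp)]
        rw [show List.drop (List.length ([] : List Char) + 1) ('|' :: cs) = cs from rfl]
        rw [ih cs (k + 1) (by omega)]
        simp [List.count_cons, hc]
        omega
      · have hpre : (['|'].isPrefixOf (c :: cs)) = false := by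
          simp [List.isPrefixOf]
          exact fun hh => hc hh.symm
        rw [hpre]
        simp only [Bool.false_eq_true, if_false]
        rw [ih cs k (by simpa using Nat.le_of_succ_le_succ h)]
        simp [List.count_cons, hc]
  
lemma pv_chars_count_eq (cs : List Char) : PySem.Chars.count cs ['|'] = cs.count '|' := by
  unfold PySem.Chars.count
  simp only [List.isEmpty_cons, Bool.false_eq_true, if_false]
  simpa using pv_count_go cs cs.length 0 le_rfl

-- the loop of A computes exactly B's find/count/slice expression (for any initial bars)
lemma pv_barsLoop_eq (cs : List Char) (bars : Int) :
    pvBarsLoopA cs bars =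
      (if PySem.Chars.find cs ['-'] = -1 then none
       else some (bars + ((PySem.List.slice cs none (some (PySem.Chars.find cs ['-']))).count '|' : Int),
                  String.ofList (PySem.List.slice cs (some (PySem.Chars.find cs ['-'] + 2)) none))) := by
  induction cs generalizing bars with
  | nil => simp [pvBarsLoopA, pv_find_nil]
  | cons c cs ih =>
    rw [pv_find_cons]
    by_cases hdash : c = '-'
    · subst hdash
      have h1 : pvBarsLoopA ('-' :: cs) bars = some (bars, String.ofList (cs.drop 1)) := by
        simp [pvBarsLoopA]
      rw [h1, if_pos rfl]
      have h2 : PySem.List.slice ('-' :: cs) none (some (0 : Int)) = [] := by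
        simpa using PySem.List.slice_to_natCast ('-' :: cs) 0
      have h3 : PySem.List.slice ('-' :: cs) (some ((0 : Int) + 2)) none = cs.drop 1 := by
        have := PySem.List.slice_from_natCast ('-' :: cs) 2
        simpa using this
      rw [if_neg (by omega), h2, h3]
      simp
    · rw [if_neg hdash]
      by_cases hmiss : PySem.Chars.find cs ['-'] = -1
      · rw [if_pos hmiss]
        simp only [pvBarsLoopA]
        by_cases hbar : c = '|'
        · rw [if_pos hbar, ih, if_pos hmiss]
          simp
        · rw [if_neg hbar, if_neg hdash, ih, if_pos hmiss]
          simp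
      · rw [if_neg hmiss]
        have hnn : 0 ≤ PySem.Chars.find cs ['-'] := by
          have := PySem.Chars.neg_one_le_find cs ['-']
          omega
        obtain ⟨n, hn⟩ := Int.eq_ofNat_of_zero_le hnn
        have hslice1 : PySem.List.slice (c :: cs) none (some ((n : Int) + 1)) = c :: cs.take n := by
          have : ((n : Int) + 1) = ((n + 1 : Nat) : Int) := by push_cast; ring
          rw [this, PySem.List.slice_to_natCast]
          simp
        have hslice2 : PySem.List.slice (c :: cs) (some ((n : Int) + 1 + 2)) none = cs.drop (n + 2) := by
          have : ((n : Int) + 1 + 2) = ((n + 3 : Nat) : Int) := by push_cast; ring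
          rw [this, PySem.List.slice_from_natCast]
          simp
        have hslice1' : PySem.List.slice cs none (some ((n : Int))) = cs.take n := by
          simpa using PySem.List.slice_to_natCast cs n
        have hslice2' : PySem.List.slice cs (some ((n : Int) + 2)) none = cs.drop (n + 2) := by
          have : ((n : Int) + 2) = ((n + 2 : Nat) : Int) := by push_cast; ring
          rw [this, PySem.List.slice_from_natCast]
        rw [hn, if_neg (show ¬((n : Int) + 1 = -1) by omega), hslice1, hslice2]
        simp only [pvBarsLoopA]
        by_cases hbar : c = '|'
        · rw [if_pos hbar, ih, if_neg hmiss, hn, hslice1', hslice2']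
          simp [List.count_cons, hbar]
          ring
        · rw [if_neg hbar, if_neg hdash, ih, if_neg hmiss, hn, hslice1', hslice2']
          simp [hbar]

-- ===== VERDICT (by name: the statement is the Claim_ definition above) =====
theorem take_bars_and_arrow_py_spec : Claim_equal_take_bars_and_arrow_py := by
  intro line _ _
  unfold Spec_take_bars_and_arrow_py take_bars_and_arrow_py take_bars_and_arrow_py_alt
  have hfind : PySem.Str.find line "-" = PySem.Chars.find line.toList ['-'] := by
    simp [PySem.Str.find_eq]
  rw [pv_barsLoop_eq, hfind]
  by_cases h : PySem.Chars.find line.toList ['-'] = -1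
  · simp [h]
  · simp only [h, ite_false, pv_chars_count_eq]
    simp
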